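-- pv_equiv track=rewrite | github.com/hareshaprajapati/langgraph-agentic-ai | Single_V2_0/Siko_Sat.py | _hit_summary
-- ===== SOURCE A (Python) =====
-- from typing import List, Dict, Tuple, Optional
--
-- def _hit_summary(real_draw: List[int], tickets: List[List[int]]) -> Dict[str, int]:
--     rd_set = set(real_draw)
--     counts = {0: 0, 1: 0, 2: 0, 3: 0, 4: 0, 5: 0, 6: 0}
--     total_hits = 0
--     max_hit = 0
--     for t in tickets:
--         hit_n = len(set(t).intersection(rd_set))
--         counts[hit_n] = counts.get(hit_n, 0) + 1
--         total_hits += hit_n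
--         if hit_n > max_hit:
--             max_hit = hit_n
--     return {
--         "ge3": sum(counts[h] for h in counts if h >= 3),
--         "ge2": sum(counts[h] for h in counts if h >= 2),
--         "total_hits": total_hits,
--         "max_hit": max_hit,
--     }
-- ===== SOURCE B (Python) =====
-- from typing import List, Dict
--
-- def _hit_summary(real_draw: List[int], tickets: List[List[int]]) -> Dict[str, int]:
--     rd_set = set(real_draw)
--
--     def summarize(ts):
--         # (ge3, ge2, total_hits, max_hit) for this slice, combined divide-and-conquer
--         if not ts:
--             return (0, 0, 0, 0)
--         if len(ts) == 1:
--             h = len(set(ts[0]).intersection(rd_set))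
--             return (1 if h >= 3 else 0, 1 if h >= 2 else 0, h, h)
--         mid = len(ts) // 2
--         g3l, g2l, tl, ml = summarize(ts[:mid])
--         g3r, g2r, tr, mr = summarize(ts[mid:])
--         return (g3l + g3r, g2l + g2r, tl + tr, ml if mr <= ml else mr)
--
--     ge3, ge2, total_hits, max_hit = summarize(tickets)
--     return {"ge3": ge3, "ge2": ge2, "total_hits": total_hits, "max_hit": max_hit}
-- ===== Notes on version B (the rewrite author's own statement) =====
-- stated objective: alternative
-- what changed: Replaces A's histogram-dict pass plus trailing sum-comprehensions with a divide-and-conquer recursion: each half of the tickets is summarized to a (ge3, ge2, total_hits, max_hit) tuple and the two summaries are merged by addition/max, with single tickets as the base case.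
import Mathlib
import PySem

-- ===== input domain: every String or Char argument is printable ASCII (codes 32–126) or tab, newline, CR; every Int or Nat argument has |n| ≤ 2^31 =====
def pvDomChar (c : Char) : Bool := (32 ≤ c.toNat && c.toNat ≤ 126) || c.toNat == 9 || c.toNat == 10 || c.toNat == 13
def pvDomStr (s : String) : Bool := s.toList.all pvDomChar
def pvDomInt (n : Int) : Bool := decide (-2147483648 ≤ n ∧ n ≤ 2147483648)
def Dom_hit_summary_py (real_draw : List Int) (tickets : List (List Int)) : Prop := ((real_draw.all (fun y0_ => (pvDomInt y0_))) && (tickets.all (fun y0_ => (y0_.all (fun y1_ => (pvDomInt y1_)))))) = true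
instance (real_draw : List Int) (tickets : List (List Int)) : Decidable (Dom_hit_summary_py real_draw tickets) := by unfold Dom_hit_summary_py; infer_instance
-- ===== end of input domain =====

-- B replaces A's histogram dict + trailing sum-comprehensions by a divide-and-conquer
-- recursion that merges (ge3, ge2, total_hits, max_hit) summaries of the two halves
-- (alternative decomposition; same asymptotic cost).


-- ===== PORT A =====
-- hit_n = len(set(t).intersection(rd_set))
def pvHitN (rd_set : PySem.Set Int) (t : List Int) : Int :=
  (PySem.Set.inter (PySem.Set.ofList t) rd_set).length

def hit_summary_py (real_draw : List Int) (tickets : List (List Int)) : List (String × Int) :=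
  let rd_set : PySem.Set Int := PySem.Set.ofList real_draw
  let init : PySem.Dict Int Int :=
    PySem.Dict.ofList [(0, 0), (1, 0), (2, 0), (3, 0), (4, 0), (5, 0), (6, 0)]
  -- for t in tickets: counts[hit_n] = counts.get(hit_n, 0) + 1; total_hits += hit_n; if hit_n > max_hit: max_hit = hit_n
  let st := tickets.foldl
    (fun (s : PySem.Dict Int Int × Int × Int) t =>
      (s.1.insert (pvHitN rd_set t) (s.1.getD (pvHitN rd_set t) 0 + 1),
       s.2.1 + pvHitN rd_set t,
       if pvHitN rd_set t > s.2.2 then pvHitN rd_set t else s.2.2))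
    (init, 0, 0)
  let counts := st.1
  [("ge3", ((counts.keys.filter (fun h => 3 ≤ h)).map (fun h => counts.getD h 0)).sum),
   ("ge2", ((counts.keys.filter (fun h => 2 ≤ h)).map (fun h => counts.getD h 0)).sum),
   ("total_hits", st.2.1),
   ("max_hit", st.2.2)]

-- ===== PORT B =====
-- summarize(ts): Source B's divide-and-conquer; the three branches 'not ts' / 'len(ts) == 1' /
-- otherwise are the three match arms; ts[:mid]/ts[mid:] with 0 ≤ mid ≤ len(ts) are exactly
-- List.take/List.drop, and ts[0] on the singleton branch is the matched element.
def pvSummarize (rd : PySem.Set Int) (ts : List (List Int)) : Int × Int × Int × Int :=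
  match ts with
  | [] => (0, 0, 0, 0)
  | [t] =>
    let h := pvHitN rd t
    ((if 3 ≤ h then 1 else 0), (if 2 ≤ h then 1 else 0), h, h)
  | t1 :: t2 :: rest =>
    let mid := (t1 :: t2 :: rest).length / 2
    let l := pvSummarize rd ((t1 :: t2 :: rest).take mid)
    let r := pvSummarize rd ((t1 :: t2 :: rest).drop mid)
    (l.1 + r.1, l.2.1 + r.2.1, l.2.2.1 + r.2.2.1,
     if r.2.2.2 ≤ l.2.2.2 then l.2.2.2 else r.2.2.2)
termination_by ts.length
decreasing_by
  · simp [List.length_take]; omega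
  · simp; omega

def hit_summary_py_alt (real_draw : List Int) (tickets : List (List Int)) : List (String × Int) :=
  let rd_set : PySem.Set Int := PySem.Set.ofList real_draw
  let st := pvSummarize rd_set tickets
  [("ge3", st.1), ("ge2", st.2.1), ("total_hits", st.2.2.1), ("max_hit", st.2.2.2)]

-- ===== PRECONDITION & SPEC =====
def Spec_hit_summary_py (real_draw : List Int) (tickets : List (List Int)) (out : List (String × Int)) : Prop := out = hit_summary_py_alt real_draw tickets
instance (real_draw : List Int) (tickets : List (List Int)) (out : List (String × Int)) : Decidable (Spec_hit_summary_py real_draw tickets out) := by unfold Spec_hit_summary_py; infer_instance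

-- ===== CLAIM (what is proved, stated in full; the proofs are below) =====
def Claim_equal_hit_summary_py : Prop := ∀ (real_draw : List Int) (tickets : List (List Int)), Dom_hit_summary_py real_draw tickets → Spec_hit_summary_py real_draw tickets (hit_summary_py real_draw tickets)

-- ===== LEMMAS AND PROOFS =====

-- pvHitN is a list length, hence nonnegative.
theorem pvHitN_nonneg (rd : PySem.Set Int) (t : List Int) : 0 ≤ pvHitN rd t :=
  Int.natCast_nonneg _

-- A's initial histogram: every value is 0, so getD is 0 at every key.
theorem pvInit_getD (v : Int) :
    (PySem.Dict.ofList [((0 : Int), (0 : Int)), (1, 0), (2, 0), (3, 0), (4, 0), (5, 0), (6, 0)]).getD v 0 = 0 := by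
  simp only [PySem.Dict.getD_eq_get?_getD]
  have h : (PySem.Dict.ofList [((0 : Int), (0 : Int)), (1, 0), (2, 0), (3, 0), (4, 0), (5, 0), (6, 0)])
      = PySem.Dict.mk [(0, 0), (1, 0), (2, 0), (3, 0), (4, 0), (5, 0), (6, 0)] := by decide
  rw [h]
  simp only [PySem.Dict.get?_mk_cons]
  split_ifs <;> rfl

-- Counting fact behind A's trailing comprehension: over a Nodup key list K covering every
-- element of hits, summing hits.count over the keys satisfying p counts the hits satisfying p.
theorem pvSumCount (p : Int → Bool) (K : List Int) (hits : List Int)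
    (hK : K.Nodup) (hsub : ∀ x ∈ hits, x ∈ K) :
    ((K.filter p).map (fun k => (hits.count k : Int))).sum = (hits.countP p : Int) := by
  induction hits with
  | nil => simp
  | cons x hs ih =>
    have hx : x ∈ K := hsub x (List.mem_cons_self)
    have hrest : ∀ y ∈ hs, y ∈ K := fun y hy => hsub y (List.mem_cons_of_mem _ hy)
    have hcnt : ∀ k : Int, ((x :: hs).count k : Int) = (hs.count k : Int) + (if k = x then 1 else 0) := by
      intro k
      by_cases h : k = x
      · simp [h]
      · simp [h, show ¬x = k from fun hh => h hh.symm]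
    have hone : ((K.filter p).map (fun k => (if k = x then (1 : Int) else 0))).sum
        = ((K.filter p).count x : Int) := by
      induction K.filter p with
      | nil => simp
      | cons a l ihl =>
        simp only [List.map_cons, List.sum_cons, ihl]
        by_cases h : a = x
        · simp [h, add_comm]
        · simp [h]
    calc ((K.filter p).map (fun k => ((x :: hs).count k : Int))).sum
        = ((K.filter p).map (fun k => (hs.count k : Int) + (if k = x then 1 else 0))).sum := by
          simp only [hcnt]
      _ = ((K.filter p).map (fun k => (hs.count k : Int))).sum
            + ((K.filter p).map (fun k => (if k = x then (1 : Int) else 0))).sum := by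
          rw [← List.sum_map_add]
      _ = (hs.countP p : Int) + (if p x then 1 else 0) := by
          rw [ih hrest, hone]
          congr 1
          by_cases hp : p x
          · have hmem : x ∈ K.filter p := List.mem_filter.mpr ⟨hx, hp⟩
            rw [List.count_eq_one_of_mem (hK.filter p) hmem]
            simp [hp]
          · have hnm : x ∉ K.filter p := fun h => hp (List.of_mem_filter h)
            rw [List.count_eq_zero_of_not_mem hnm]
            simp [hp]
      _ = ((x :: hs).countP p : Int) := by
          by_cases hp : p x <;> simp [hp]

-- max algebra for the running-maximum folds
theorem pvFoldlMaxShift (l : List Int) (a b : Int) :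
    l.foldl max (max a b) = max a (l.foldl max b) := by
  induction l generalizing b with
  | nil => rfl
  | cons x l ih => simp only [List.foldl_cons, max_assoc, ih]

theorem pvLeFoldlMax (l : List Int) (a : Int) : a ≤ l.foldl max a := by
  induction l generalizing a with
  | nil => exact le_refl a
  | cons x l ih => exact le_trans (le_max_left a x) (ih (max a x))

theorem pvFoldlMaxAppend (l r : List Int) :
    (l ++ r).foldl max 0 = max (l.foldl max 0) (r.foldl max 0) := by
  rw [List.foldl_append]
  conv_lhs => rw [← max_eq_left (pvLeFoldlMax l 0), pvFoldlMaxShift]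

-- Characterization of B's divide-and-conquer: it computes the ge3/ge2 counts,
-- the sum and the running maximum of the per-ticket hit counts.
theorem pvSummarize_char (rd : PySem.Set Int) (ts : List (List Int)) :
    pvSummarize rd ts =
      (((ts.map (pvHitN rd)).countP (fun h => decide (3 ≤ h)) : Int),
       ((ts.map (pvHitN rd)).countP (fun h => decide (2 ≤ h)) : Int),
       (ts.map (pvHitN rd)).sum,
       (ts.map (pvHitN rd)).foldl max 0) := by
  induction ts using pvSummarize.induct rd with
  | case1 => rw [pvSummarize]; simp
  | case2 t =>
    rw [pvSummarize]
    have hh : 0 ≤ pvHitN rd t := pvHitN_nonneg rd t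
    simp only [List.map_cons, List.map_nil, List.countP_cons, List.countP_nil,
      List.sum_cons, List.sum_nil, List.foldl_cons, List.foldl_nil, add_zero,
      Prod.mk.injEq]
    refine ⟨?_, ?_, trivial, (max_eq_right hh).symm⟩
    · by_cases h3 : (3 : Int) ≤ pvHitN rd t <;> simp [h3]
    · by_cases h2 : (2 : Int) ≤ pvHitN rd t <;> simp [h2]
  | case3 t1 t2 rest mid ihl ihr =>
    rw [pvSummarize]
    have hmid : mid = (t1 :: t2 :: rest).length / 2 := rfl
    rw [← hmid]
    conv_rhs => rw [← List.take_append_drop mid (t1 :: t2 :: rest)]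
    rw [List.map_append, List.countP_append, List.countP_append, List.sum_append,
        pvFoldlMaxAppend, ihl, ihr]
    simp only [Prod.mk.injEq]
    refine ⟨by push_cast; ring, by push_cast; ring, trivial, ?_⟩
    simp only [max_def]
    split_ifs <;> omega

-- ===== VERDICT (by name: the statement is the Claim_ definition above) =====
theorem hit_summary_py_spec : Claim_equal_hit_summary_py := by
  intro real_draw tickets _
  unfold Spec_hit_summary_py hit_summary_py hit_summary_py_alt
  set rd_set := PySem.Set.ofList real_draw with hrd
  set init : PySem.Dict Int Int :=
    PySem.Dict.ofList [(0, 0), (1, 0), (2, 0), (3, 0), (4, 0), (5, 0), (6, 0)] with hinit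
  simp only
  -- split A's loop into three independent folds
  rw [PySem.List.foldl_prod_mk
        (f := fun (d : PySem.Dict Int Int) t => d.insert (pvHitN rd_set t) (d.getD (pvHitN rd_set t) 0 + 1))
        (g := fun (s : Int × Int) t =>
          (s.1 + pvHitN rd_set t, if pvHitN rd_set t > s.2 then pvHitN rd_set t else s.2)),
      PySem.List.foldl_prod_mk
        (f := fun (a : Int) t => a + pvHitN rd_set t)
        (g := fun (m : Int) t => if pvHitN rd_set t > m then pvHitN rd_set t else m)]
  simp only
  -- A's dict loop is a counting loop over the hit counts tickets.map (pvHitN rd_set)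
  have hdict : tickets.foldl
      (fun (d : PySem.Dict Int Int) t => d.insert (pvHitN rd_set t) (d.getD (pvHitN rd_set t) 0 + 1)) init
      = (tickets.map (pvHitN rd_set)).foldl (fun d x => d.insert x (d.getD x 0 + 1)) init := by
    rw [List.foldl_map]
  have hnodup : (tickets.foldl
      (fun (d : PySem.Dict Int Int) t => d.insert (pvHitN rd_set t) (d.getD (pvHitN rd_set t) 0 + 1)) init).keys.Nodup := by
    rw [hdict]
    exact PySem.Dict.nodup_keys_foldl_insert _ _ _ (by decide)
  have hgetD : ∀ v, (tickets.foldl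
      (fun (d : PySem.Dict Int Int) t => d.insert (pvHitN rd_set t) (d.getD (pvHitN rd_set t) 0 + 1)) init).getD v 0
      = ((tickets.map (pvHitN rd_set)).count v : Int) := by
    intro v
    rw [hdict, PySem.Dict.getD_foldl_insert_add_one, hinit, pvInit_getD, zero_add]
  have hsub : ∀ x ∈ tickets.map (pvHitN rd_set), x ∈ (tickets.foldl
      (fun (d : PySem.Dict Int Int) t => d.insert (pvHitN rd_set t) (d.getD (pvHitN rd_set t) 0 + 1)) init).keys := by
    intro x hx
    rw [hdict, PySem.Dict.keys_foldl_insert]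
    exact (PySem.Set.mem_update _ _ _).mpr (Or.inr hx)
  have hsum : ∀ p : Int → Bool,
      (((tickets.foldl
        (fun (d : PySem.Dict Int Int) t => d.insert (pvHitN rd_set t) (d.getD (pvHitN rd_set t) 0 + 1)) init).keys.filter p).map
          (fun h => (tickets.foldl
            (fun (d : PySem.Dict Int Int) t => d.insert (pvHitN rd_set t) (d.getD (pvHitN rd_set t) 0 + 1)) init).getD h 0)).sum
      = ((tickets.map (pvHitN rd_set)).countP p : Int) := by
    intro p
    rw [List.map_congr_left (fun k _ => hgetD k)]
    exact pvSumCount p _ _ hnodup hsub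
  -- A's running total and maximum are the sum and running maximum of the hit counts
  have htot : tickets.foldl (fun (a : Int) t => a + pvHitN rd_set t) 0
      = (tickets.map (pvHitN rd_set)).sum := by
    rw [PySem.List.foldl_add, zero_add]
  have hfun : (fun (m : Int) t => if pvHitN rd_set t > m then pvHitN rd_set t else m)
      = fun (m : Int) t => max m (pvHitN rd_set t) := by
    funext m t
    rcases le_or_gt (pvHitN rd_set t) m with hle | hgt
    · simp [not_lt.mpr hle, max_eq_left hle]
    · simp [hgt, max_eq_right (le_of_lt hgt)]
  have hmax : tickets.foldl (fun (m : Int) t => if pvHitN rd_set t > m then pvHitN rd_set t else m) 0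
      = (tickets.map (pvHitN rd_set)).foldl max 0 := by
    rw [hfun, ← List.foldl_map]
  rw [hsum (fun h => decide (3 ≤ h)), hsum (fun h => decide (2 ≤ h)), htot, hmax,
      pvSummarize_char]
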